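-- pv_equiv track=rewrite | github.com/edge555/Online-Judge-Solves | Google/Foobar/Level 4/free-the-bunny-prisoners/solution.py | solution
-- ===== SOURCE A (Python) =====
-- from itertools import combinations
--
-- def solution(num_buns, num_required):
--     repeat = num_buns - num_required+1
--     ans=[]
--     for _ in range(num_buns):
--         ans.append([])
--     if num_required==0:
--         return ans
--     keys = list(combinations(range(num_buns),repeat))
--     for i in range(len(keys)):
--         for j in range(len(keys[i])):
--             k = keys[i][j]
--             ans[k].append(i)
--     return ans
-- ===== SOURCE B (Python) =====
-- from itertools import combinations
--
-- def solution(num_buns, num_required):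
--     if num_required == 0:
--         return [[] for _ in range(num_buns)]
--     repeat = num_buns - num_required + 1
--     keys = list(combinations(range(num_buns), repeat))
--     return [[i for i, combo in enumerate(keys) if k in combo]
--             for k in range(num_buns)]
-- ===== Notes on version B (the rewrite author's own statement) =====
-- stated objective: alternative
-- what changed: A scatters: it walks the combinations and appends each index i into the mutable row of every bunny in the combo; B gathers: it builds each bunny's row directly as the ascending list of indices of combinations containing that bunny, with no mutable answer table.
import Mathlib
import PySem

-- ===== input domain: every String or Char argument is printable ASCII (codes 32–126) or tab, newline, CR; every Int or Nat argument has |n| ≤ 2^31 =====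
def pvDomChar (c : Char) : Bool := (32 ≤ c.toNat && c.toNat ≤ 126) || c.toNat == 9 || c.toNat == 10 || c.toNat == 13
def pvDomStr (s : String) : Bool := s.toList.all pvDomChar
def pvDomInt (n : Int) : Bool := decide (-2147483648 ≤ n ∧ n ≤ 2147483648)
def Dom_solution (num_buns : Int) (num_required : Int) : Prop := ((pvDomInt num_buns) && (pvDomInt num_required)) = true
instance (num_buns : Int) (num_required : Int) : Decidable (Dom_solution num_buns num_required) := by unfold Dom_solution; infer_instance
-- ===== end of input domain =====

-- B builds each bunny's row by gathering the indices of combinations containing it,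
-- instead of A's scatter into a mutable answer table; same cost class, no speed claim.

-- ===== PORT A =====

-- itertools.combinations(pool, r) in lexicographic order (shared helper; both Pythons call it);
-- the 'if' mirrors itertools' own early exit 'if r > n: return' (CPython combinations)
def pyCombs : List Int → Nat → List (List Int)
  | _, 0 => [[]]
  | [], _ + 1 => []
  | x :: xs, r + 1 =>
    if xs.length < r then []
    else ((pyCombs xs r).map (fun c => x :: c)) ++ pyCombs xs (r + 1)

-- ans[k].append(i): k is provably nonnegative here (it comes from range(num_buns)),
-- so .toNat indexing is exact on every reachable input
def pvAppendAt (ans : List (List Int)) (k : Int) (i : Int) : List (List Int) :=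
  ans.modify k.toNat (fun row => row ++ [i])

def solution (num_buns : Int) (num_required : Int) : List (List Int) :=
  let rep := num_buns - num_required + 1
  let ans := (PySem.List.pyRange 0 num_buns 1).foldl (fun a _ => a ++ [([] : List Int)]) []
  if num_required == 0 then ans
  else
    let keys := pyCombs (PySem.List.pyRange 0 num_buns 1) rep.toNat
    (PySem.List.enumerate keys).foldl
      (fun a p => p.2.foldl (fun a k => pvAppendAt a k p.1) a) ans

-- ===== PORT B =====
def solution_alt (num_buns : Int) (num_required : Int) : List (List Int) :=
  if num_required == 0 then (PySem.List.pyRange 0 num_buns 1).map (fun _ => ([] : List Int))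
  else
    let rep := num_buns - num_required + 1
    let keys := pyCombs (PySem.List.pyRange 0 num_buns 1) rep.toNat
    (PySem.List.pyRange 0 num_buns 1).map (fun k =>
      ((PySem.List.enumerate keys).filter (fun p => k ∈ p.2)).map (fun p => p.1))

-- ===== PRECONDITION & SPEC =====
-- Pre_ excludes exactly the inputs where repeat = num_buns - num_required + 1 is negative,
-- on which A's combinations(...) raises ValueError (B raises identically there).
def Pre_solution (num_buns : Int) (num_required : Int) : Prop :=
  num_required = 0 ∨ 0 ≤ num_buns - num_required + 1
instance (num_buns : Int) (num_required : Int) : Decidable (Pre_solution num_buns num_required) := by unfold Pre_solution; infer_instance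

def pvWitness_solution : Int × Int := (4, 2)

def Spec_solution (num_buns : Int) (num_required : Int) (out : List (List Int)) : Prop := out = solution_alt num_buns num_required
instance (num_buns : Int) (num_required : Int) (out : List (List Int)) : Decidable (Spec_solution num_buns num_required out) := by unfold Spec_solution; infer_instance

-- ===== CLAIM (what is proved, stated in full; the proofs are below) =====
def Claim_equal_solution : Prop := ∀ (num_buns : Int) (num_required : Int), Dom_solution num_buns num_required → Pre_solution num_buns num_required → Spec_solution num_buns num_required (solution num_buns num_required)

-- ===== LEMMAS AND PROOFS =====

-- every combination is a sublist of the pool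
theorem pyCombs_sublist : ∀ (l : List Int) (r : Nat) (c : List Int), c ∈ pyCombs l r → c.Sublist l := by
  intro l
  induction l with
  | nil =>
    intro r c hc
    cases r with
    | zero => simp [pyCombs] at hc; simp [hc]
    | succ r => simp [pyCombs] at hc
  | cons x xs ih =>
    intro r c hc
    cases r with
    | zero => simp [pyCombs] at hc; simp [hc]
    | succ r =>
      by_cases hlen : xs.length < r
      · simp [pyCombs, hlen] at hc
      · simp only [pyCombs, hlen, if_false, List.mem_append, List.mem_map] at hc
        rcases hc with ⟨c', hc', rfl⟩ | hc
        · exact (ih r c' hc').cons₂ x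
        · exact (ih (r + 1) c hc).cons x

-- distributing index i over one combo, read pointwise
theorem get_distribute (i : Int) :
    ∀ (c : List Int), c.Nodup → (∀ k ∈ c, 0 ≤ k) → ∀ (ans : List (List Int)) (j : Nat),
      (c.foldl (fun a k => pvAppendAt a k i) ans)[j]? =
        if (j : Int) ∈ c then ans[j]?.map (fun row => row ++ [i]) else ans[j]? := by
  intro c
  induction c with
  | nil => intro _ _ ans j; simp
  | cons k rest ih =>
    intro hnd hpos ans j
    have hk : 0 ≤ k := hpos k (by simp)
    have hknr : k ∉ rest := (List.nodup_cons.mp hnd).1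
    simp only [List.foldl_cons]
    rw [ih (List.nodup_cons.mp hnd).2 (fun x hx => hpos x (by simp [hx]))]
    by_cases hjr : (j : Int) ∈ rest
    · have hjk : (j : Int) ≠ k := fun h => hknr (h ▸ hjr)
      have hjk' : k.toNat ≠ j := by omega
      simp [hjr, pvAppendAt, hjk']
    · by_cases hjk : (j : Int) = k
      · have : k.toNat = j := by omega
        simp [hjk, pvAppendAt, this, hknr]
      · have hjk' : k.toNat ≠ j := by omega
        simp [hjr, hjk, pvAppendAt, hjk']

-- the scatter fold, read pointwise: row j collects the first components of the
-- pairs whose combo contains j, in order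
theorem get_scatter :
    ∀ (pairs : List (Int × List Int)),
      (∀ p ∈ pairs, p.2.Nodup ∧ ∀ k ∈ p.2, 0 ≤ k) →
      ∀ (ans : List (List Int)) (j : Nat),
      (pairs.foldl (fun a p => p.2.foldl (fun a k => pvAppendAt a k p.1) a) ans)[j]? =
        ans[j]?.map (fun row => row ++ (pairs.filter (fun p => (j : Int) ∈ p.2)).map (fun p => p.1)) := by
  intro pairs
  induction pairs with
  | nil =>
    intro _ ans j
    cases hx : ans[j]? <;> simp [hx]
  | cons p rest ih =>
    intro hp ans j
    simp only [List.foldl_cons]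
    rw [ih (fun q hq => hp q (by simp [hq]))]
    rw [get_distribute p.1 p.2 (hp p (by simp)).1 (hp p (by simp)).2]
    by_cases hj : (j : Int) ∈ p.2
    · simp only [hj, if_pos, List.filter_cons, decide_eq_true_eq]
      cases ans[j]? <;> simp
    · simp only [hj, List.filter_cons, decide_eq_true_eq]
      cases ans[j]? <;> simp

theorem init_ans_eq (num_buns : Int) :
    (PySem.List.pyRange 0 num_buns 1).foldl (fun a _ => a ++ [([] : List Int)]) [] =
      (PySem.List.pyRange 0 num_buns 1).map (fun _ => ([] : List Int)) := by
  have h : ∀ (l : List Int) (acc : List (List Int)),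
      l.foldl (fun a _ => a ++ [([] : List Int)]) acc = acc ++ l.map (fun _ => []) := by
    intro l
    induction l with
    | nil => simp
    | cons x xs ih => intro acc; simp [ih]
  simp [h (PySem.List.pyRange 0 num_buns 1) []]

-- ===== VERDICT (by name: the statement is the Claim_ definition above) =====
theorem solution_spec : Claim_equal_solution := by
  intro num_buns num_required _ _
  unfold Spec_solution solution solution_alt
  by_cases h0 : num_required == 0
  · rw [if_pos h0, if_pos h0, init_ans_eq]
  · rw [if_neg h0, if_neg h0]
    have hprops : ∀ p ∈ PySem.List.enumerate (pyCombs (PySem.List.pyRange 0 num_buns 1) (num_buns - num_required + 1).toNat), p.2.Nodup ∧ ∀ k ∈ p.2, 0 ≤ k := by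
      intro p hp
      have h2 : p.2 ∈ pyCombs (PySem.List.pyRange 0 num_buns 1) (num_buns - num_required + 1).toNat := by
        have hms := PySem.List.map_snd_enumerate (pyCombs (PySem.List.pyRange 0 num_buns 1) (num_buns - num_required + 1).toNat) (0 : Int)
        rw [← hms]
        exact List.mem_map_of_mem hp
      have hsub := pyCombs_sublist _ _ p.2 h2
      refine ⟨hsub.nodup (PySem.List.nodup_pyRange_one 0 num_buns), fun k hk => ?_⟩
      have hmem := hsub.mem hk
      rw [PySem.List.mem_pyRange_one] at hmem
      exact hmem.1
    apply List.ext_getElem?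
    intro j
    rw [get_scatter _ hprops, init_ans_eq num_buns]
    rw [List.getElem?_map, List.getElem?_map]
    by_cases hj : j < (PySem.List.pyRange 0 num_buns 1).length
    · rw [List.getElem?_eq_getElem hj]
      have hjv : (PySem.List.pyRange 0 num_buns 1)[j] = (j : Int) := by
        rw [PySem.List.getElem_pyRange_one]
        simp
      simp [hjv]
    · rw [List.getElem?_eq_none (by omega)]
      rfl
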